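-- pv_equiv track=rewrite | github.com/Dinesh-Kumar-Tunguturi/trush | templates/main/calculate_ats_score.py | score_certifications
-- ===== SOURCE A (Python) =====
-- def score_certifications(text):
--     score = 0
--     lines = text.lower().splitlines()
--     cert_keywords = ["coursera", "ibm", "aws", "google", "data", "certificate", "udemy", "microsoft"]
--     recent_keywords = ["2023", "2024", "2025"]
--     cert_lines = [line for line in lines if any(k in line for k in cert_keywords)]
--
--     if len(cert_lines) > 0:
--         score += 5
--     if any(platform in line for platform in cert_keywords for line in cert_lines):
--         score += 5
--     if any(date in line for date in recent_keywords for line in cert_lines):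
--         score += 3
--     if any("coursera" in line and "certificate" in line for line in cert_lines):
--         score += 2
--
--     return min(score, 15)
-- ===== SOURCE B (Python) =====
-- CERT_KEYWORDS = ["coursera", "ibm", "aws", "google", "data", "certificate", "udemy", "microsoft"]
-- RECENT_KEYWORDS = ["2023", "2024", "2025"]
--
-- def score_certifications(text):
--     has_cert = has_recent = has_both = False
--     for line in text.lower().splitlines():
--         if any(k in line for k in CERT_KEYWORDS):
--             has_cert = True
--             if any(d in line for d in RECENT_KEYWORDS):
--                 has_recent = True
--             if "coursera" in line and "certificate" in line:
--                 has_both = True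
--     score = (10 if has_cert else 0) + (3 if has_recent else 0) + (2 if has_both else 0)
--     return min(score, 15)
-- ===== Notes on version B (the rewrite author's own statement) =====
-- stated objective: simpler
-- what changed: Single pass over the lines maintaining three flags instead of building a cert_lines list and rescanning it three more times; the two always-equal +5 conditions are fused into one +10.
import Mathlib
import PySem

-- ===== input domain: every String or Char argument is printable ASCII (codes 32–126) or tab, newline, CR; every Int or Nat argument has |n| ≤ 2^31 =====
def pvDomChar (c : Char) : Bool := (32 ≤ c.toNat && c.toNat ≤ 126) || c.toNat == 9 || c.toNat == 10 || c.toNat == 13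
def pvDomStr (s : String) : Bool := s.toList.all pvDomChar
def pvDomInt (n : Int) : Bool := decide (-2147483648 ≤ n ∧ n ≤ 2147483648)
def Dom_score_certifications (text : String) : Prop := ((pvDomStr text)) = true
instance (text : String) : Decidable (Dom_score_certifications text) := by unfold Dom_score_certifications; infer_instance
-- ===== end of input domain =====

-- B replaces the build-cert_lines-then-rescan-three-times structure by a single fold over the
-- lines maintaining three flags (the two always-equal +5 conditions fused into one +10): simpler.

def certKeywords : List String := ["coursera", "ibm", "aws", "google", "data", "certificate", "udemy", "microsoft"]
def recentKeywords : List String := ["2023", "2024", "2025"]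

-- ===== PORT A =====
def score_certifications (text : String) : Int :=
  let score : Int := 0
  let lines := PySem.Str.splitlines (PySem.Str.lower text)
  let certLines := lines.filter (fun line => certKeywords.any (fun k => PySem.Str.isIn k line))
  let score := score + (if certLines.length > 0 then 5 else 0)
  let score := score + (if certKeywords.any (fun platform => certLines.any (fun line => PySem.Str.isIn platform line)) then 5 else 0)
  let score := score + (if recentKeywords.any (fun date => certLines.any (fun line => PySem.Str.isIn date line)) then 3 else 0)
  let score := score + (if certLines.any (fun line => PySem.Str.isIn "coursera" line && PySem.Str.isIn "certificate" line) then 2 else 0)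
  min score 15

-- ===== PORT B =====
def score_certifications_alt (text : String) : Int :=
  let st := (PySem.Str.splitlines (PySem.Str.lower text)).foldl
    (fun (st : Bool × Bool × Bool) line =>
      if certKeywords.any (fun k => PySem.Str.isIn k line) then
        (true,
         st.2.1 || recentKeywords.any (fun d => PySem.Str.isIn d line),
         st.2.2 || (PySem.Str.isIn "coursera" line && PySem.Str.isIn "certificate" line))
      else st)
    (false, false, false)
  min ((if st.1 then (10 : Int) else 0) + (if st.2.1 then 3 else 0) + (if st.2.2 then 2 else 0)) 15

-- ===== PRECONDITION & SPEC =====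
def Spec_score_certifications (text : String) (out : Int) : Prop := out = score_certifications_alt text
instance (text : String) (out : Int) : Decidable (Spec_score_certifications text out) := by unfold Spec_score_certifications; infer_instance

-- ===== CLAIM (what is proved, stated in full; the proofs are below) =====
def Claim_equal_score_certifications : Prop := ∀ (text : String), Dom_score_certifications text → Spec_score_certifications text (score_certifications text)

-- ===== LEMMAS AND PROOFS =====

-- B's fold over all lines computes the three "any over the filtered cert lines" facts.
theorem fold_flags (p q w : String → Bool) (ls : List String) (c r b : Bool) :
    ls.foldl
      (fun (st : Bool × Bool × Bool) line =>
        if p line then (true, st.2.1 || q line, st.2.2 || w line) else st)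
      (c, r, b)
    = (c || !(ls.filter p).isEmpty, r || (ls.filter p).any q, b || (ls.filter p).any w) := by
  induction ls generalizing c r b with
  | nil => simp
  | cons l t ih =>
    by_cases hp : p l = true
    · simp [List.foldl_cons, hp, ih, Bool.or_assoc]
    · simp at hp
      simp [List.foldl_cons, hp, ih]

-- swapping the two generators of a double `any`
theorem any_swap {α β : Type} (xs : List α) (ys : List β) (f : α → β → Bool) :
    xs.any (fun x => ys.any (fun y => f x y)) = ys.any (fun y => xs.any (fun x => f x y)) := by
  rw [Bool.eq_iff_iff]
  simp only [List.any_eq_true]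
  constructor <;> rintro ⟨a, ha, b, hb, h⟩ <;> exact ⟨b, hb, a, ha, h⟩

-- an `any` over a list all of whose elements satisfy the predicate is mere nonemptiness
theorem any_of_all {α : Type} (P : α → Bool) (cl : List α) (h : ∀ l ∈ cl, P l = true) :
    cl.any P = !cl.isEmpty := by
  cases cl with
  | nil => simp
  | cons x t => simp [List.any_cons, h x List.mem_cons_self]

-- A's final score as a function of cert_lines (proof-side abbreviation; rfl-equal to A's body)
def pvA (cl : List String) : Int :=
  min ((0 : Int) + (if cl.length > 0 then 5 else 0)
    + (if certKeywords.any (fun platform => cl.any fun line => PySem.Str.isIn platform line) then 5 else 0)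
    + (if recentKeywords.any (fun date => cl.any fun line => PySem.Str.isIn date line) then 3 else 0)
    + (if cl.any (fun line => PySem.Str.isIn "coursera" line && PySem.Str.isIn "certificate" line) then 2 else 0)) 15

-- B's final score as a function of the flag triple (rfl-equal to B's body)
def pvB (st : Bool × Bool × Bool) : Int :=
  min ((if st.1 then (10 : Int) else 0) + (if st.2.1 then 3 else 0) + (if st.2.2 then 2 else 0)) 15

theorem key (cl : List String)
    (h : ∀ l ∈ cl, (certKeywords.any fun k => PySem.Str.isIn k l) = true) :
    pvA cl = pvB (!cl.isEmpty,
      cl.any (fun line => recentKeywords.any fun d => PySem.Str.isIn d line),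
      cl.any (fun line => PySem.Str.isIn "coursera" line && PySem.Str.isIn "certificate" line)) := by
  unfold pvA pvB
  rw [any_swap certKeywords, any_swap recentKeywords, any_of_all _ _ h]
  cases cl with
  | nil => simp
  | cons x t =>
    simp only [List.length_cons, List.isEmpty_cons, Bool.not_false, if_true]
    rw [if_pos (Nat.succ_pos t.length)]
    cases (x :: t).any (fun l => recentKeywords.any fun d => PySem.Str.isIn d l) <;>
      cases (x :: t).any (fun l => PySem.Str.isIn "coursera" l && PySem.Str.isIn "certificate" l) <;>
      norm_num

theorem main_eq (text : String) :
    score_certifications text = score_certifications_alt text := by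
  have hA : score_certifications text
      = pvA ((PySem.Str.splitlines (PySem.Str.lower text)).filter
              (fun line => certKeywords.any fun k => PySem.Str.isIn k line)) := rfl
  have hB : score_certifications_alt text
      = pvB ((PySem.Str.splitlines (PySem.Str.lower text)).foldl
          (fun (st : Bool × Bool × Bool) line =>
            if certKeywords.any (fun k => PySem.Str.isIn k line) then
              (true,
               st.2.1 || recentKeywords.any (fun d => PySem.Str.isIn d line),
               st.2.2 || (PySem.Str.isIn "coursera" line && PySem.Str.isIn "certificate" line))
            else st)
          (false, false, false)) := rfl
  rw [hA, hB, fold_flags]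
  simp only [Bool.false_or]
  exact key _ (fun l hl => (List.mem_filter.mp hl).2)

-- ===== VERDICT (by name: the statement is the Claim_ definition above) =====
theorem score_certifications_spec : Claim_equal_score_certifications := by
  intro text _
  exact main_eq text
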